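-- pv_equiv track=rewrite | github.com/giuscri/google-l3-example | qthree.py | f
-- ===== SOURCE A (Python) =====
-- from typing import List
--
-- def f(A: List[int]) -> int:
--     n = len(A)
--     dp = [0 for _ in range(n+5)]
--     dp[n-1] = A[n-1]
--     for i in range(n-2, -1, -1):
--         M = A[i] + min(dp[i+2], dp[i+3], dp[i+4])
--         if i+1 < len(A):
--             M = max(M, A[i]+A[i+1] + min(dp[i+3], dp[i+4], dp[i+5]))
--         if i+2 < len(A):
--             M = max(M, A[i]+A[i+1]+A[i+2] + min(dp[i+4], dp[i+5], dp[i+6]))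
--
--         dp[i] = M
--
--     return dp[0]
-- ===== SOURCE B (Python) =====
-- from typing import List
--
-- def f(A: List[int]) -> int:
--     # Top-down, demand-driven evaluation: memoized recursion on start indices,
--     # run with an explicit work stack (so deep inputs don't hit the recursion limit).
--     n = len(A)
--     memo = {}
--     stack = [(0, False)]
--     while stack:
--         i, ready = stack.pop()
--         if ready:
--             m = lambda d: memo.get(d, 0)
--             best = A[i] + min(m(i + 2), m(i + 3), m(i + 4))
--             if i + 1 < n:
--                 best = max(best, A[i] + A[i + 1] + min(m(i + 3), m(i + 4), m(i + 5)))
--             if i + 2 < n: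
--                 best = max(best, A[i] + A[i + 1] + A[i + 2] + min(m(i + 4), m(i + 5), m(i + 6)))
--             memo[i] = best
--         elif i < n and i not in memo:
--             stack.append((i, True))
--             for d in (i + 2, i + 3, i + 4, i + 5, i + 6):
--                 if d < n and d not in memo:
--                     stack.append((d, False))
--     return memo.get(0, 0)
-- ===== Notes on version B (the rewrite author's own statement) =====
-- stated objective: alternative
-- what changed: B replaces A's bottom-up dp array (filled right-to-left over every index after a special-cased last cell) with top-down demand-driven memoization: an explicit work stack expands only the start indices reachable from 0, storing results in a dict.
-- outside the precondition, e.g. on f([]): A raises IndexError, B returns 0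
import Mathlib
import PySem

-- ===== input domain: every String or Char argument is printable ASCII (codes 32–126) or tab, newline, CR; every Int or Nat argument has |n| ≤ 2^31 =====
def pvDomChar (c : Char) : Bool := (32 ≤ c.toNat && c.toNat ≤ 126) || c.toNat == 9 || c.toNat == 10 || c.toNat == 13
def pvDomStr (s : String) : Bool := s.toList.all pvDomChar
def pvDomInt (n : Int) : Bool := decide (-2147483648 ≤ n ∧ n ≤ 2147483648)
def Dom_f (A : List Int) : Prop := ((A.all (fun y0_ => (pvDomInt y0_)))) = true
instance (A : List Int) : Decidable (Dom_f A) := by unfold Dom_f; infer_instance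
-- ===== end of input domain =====

-- B replaces A's bottom-up dp array with top-down demand-driven memoization
-- (an explicit work stack plus a dict), expanding only indices reachable from 0.
-- ===== PORT A =====
-- xs[i] (index known non-negative in all claimed uses); none would be an IndexError
def pyAt (xs : List Int) (i : Int) : Int := (PySem.List.pyGet? xs i).getD 0

-- one iteration of A's for-loop body (dp is the mutable list)
def fStep (A : List Int) (n : Int) (dp : List Int) (i : Int) : List Int :=
  let M := pyAt A i + min (min (pyAt dp (i+2)) (pyAt dp (i+3))) (pyAt dp (i+4))
  let M := if i+1 < n then max M (pyAt A i + pyAt A (i+1) + min (min (pyAt dp (i+3)) (pyAt dp (i+4))) (pyAt dp (i+5))) else M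
  let M := if i+2 < n then max M (pyAt A i + pyAt A (i+1) + pyAt A (i+2) + min (min (pyAt dp (i+4)) (pyAt dp (i+5))) (pyAt dp (i+6))) else M
  dp.set i.toNat M

def f (A : List Int) : Int :=
  let n : Int := A.length
  let dp : List Int := (PySem.List.pyRange 0 (n+5) 1).map (fun _ => 0)
  let dp := dp.set (n-1).toNat (pyAt A (n-1))
  let dp := (PySem.List.pyRange (n-2) (-1) (-1)).foldl (fStep A n) dp
  pyAt dp 0

-- ===== PORT B =====
-- the value computed in B's `ready` branch (`m = lambda d: memo.get(d, 0)`)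
def bestVal (A : List Int) (n : Nat) (memo : PySem.Dict Nat Int) (i : Nat) : Int :=
  let m := fun d => memo.getD d 0
  let best := pyAt A i + min (min (m (i+2)) (m (i+3))) (m (i+4))
  let best := if i+1 < n then max best (pyAt A i + pyAt A (i+1) + min (min (m (i+3)) (m (i+4))) (m (i+5))) else best
  let best := if i+2 < n then max best (pyAt A i + pyAt A (i+1) + pyAt A (i+2) + min (min (m (i+4)) (m (i+5))) (m (i+6))) else best
  best

-- cost of one stack entry / of the stack: the termination measure of B's while loop
def entryCost (n : Nat) : Nat × Bool → Nat
  | (_, true) => 1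
  | (i, false) => if i < n then 6^(n-i) else 1

def stackCost (n : Nat) (s : List (Nat × Bool)) : Nat := (s.map (entryCost n)).sum

-- B's while loop: head of the list = top of Python's stack.  The fuel argument only
-- makes the recursion structural; `stackCost` strictly decreases at every step (proved
-- below), so the fuel supplied by f_alt is never exhausted.
def runB (A : List Int) (n : Nat) : Nat → List (Nat × Bool) → PySem.Dict Nat Int →
    PySem.Dict Nat Int
  | 0, _, memo => memo
  | _+1, [], memo => memo
  | fuel+1, (i, true) :: rest, memo => runB A n fuel rest (memo.insert i (bestVal A n memo i))
  | fuel+1, (i, false) :: rest, memo =>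
      if i < n ∧ (memo.get? i).isNone then
        let missing := [i+2,i+3,i+4,i+5,i+6].filter
          (fun d => decide (d < n) && (memo.get? d).isNone)
        runB A n fuel (missing.reverse.map (fun d => (d, false)) ++ (i, true) :: rest) memo
      else runB A n fuel rest memo

def f_alt (A : List Int) : Int :=
  let n : Nat := A.length
  let memo := runB A n (stackCost n [(0, false)] + 1) [(0, false)] PySem.Dict.empty
  memo.getD 0 0

-- ===== PRECONDITION & SPEC =====
-- Pre_ excludes only the empty list, on which A raises IndexError at A[n-1].
def Pre_f (A : List Int) : Prop := A ≠ []
instance (A : List Int) : Decidable (Pre_f A) := by unfold Pre_f; infer_instance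
def pvWitness_f : List Int := [3, -1, 2]

def Spec_f (A : List Int) (out : Int) : Prop := out = f_alt A
instance (A : List Int) (out : Int) : Decidable (Spec_f A out) := by unfold Spec_f; infer_instance

-- ===== CLAIM (what is proved, stated in full; the proofs are below) =====
def Claim_equal_f : Prop := ∀ (A : List Int), Dom_f A → Pre_f A → Spec_f A (f A)

-- ===== LEMMAS AND PROOFS =====

-- the common mathematical recurrence both programs compute (proof helper only)
def gspec (A : List Int) (i : Nat) : Int :=
  if _h : A.length ≤ i then 0 else
    let n : Int := A.length
    let v := pyAt A i + min (min (gspec A (i+2)) (gspec A (i+3))) (gspec A (i+4))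
    let v := if (i:Int)+1 < n then max v (pyAt A i + pyAt A (i+1) + min (min (gspec A (i+3)) (gspec A (i+4))) (gspec A (i+5))) else v
    let v := if (i:Int)+2 < n then max v (pyAt A i + pyAt A (i+1) + pyAt A (i+2) + min (min (gspec A (i+4)) (gspec A (i+5))) (gspec A (i+6))) else v
    v
termination_by A.length - i
decreasing_by all_goals omega

theorem gspec_of_ge (A : List Int) (i : Nat) (h : A.length ≤ i) : gspec A i = 0 := by
  rw [gspec]; simp [h]

-- the dependency list of index i (the tuple B iterates over)
def depsL (i : Nat) : List Nat := [i+2,i+3,i+4,i+5,i+6]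

-- every memo entry is a correct, in-range value of the recurrence
def Sound (A : List Int) (memo : PySem.Dict Nat Int) : Prop :=
  ∀ k v, memo.get? k = some v → k < A.length ∧ v = gspec A k

-- every `ready` entry's in-range dependencies are memoized or scheduled above it
def Ready (n : Nat) (memo : PySem.Dict Nat Int) : List Nat → List (Nat × Bool) → Prop
  | _, [] => True
  | seen, (i, b) :: rest =>
      (b = true → i < n ∧ ∀ d ∈ depsL i, d < n → ((memo.get? d).isSome ∨ d ∈ seen)) ∧
      Ready n memo (i :: seen) rest

-- index 0 is memoized or still on the stack (or the list is empty)
def Has0 (n : Nat) (memo : PySem.Dict Nat Int) (s : List (Nat × Bool)) : Prop :=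
  n = 0 ∨ (memo.get? 0).isSome ∨ ∃ b, (0, b) ∈ s

theorem ready_weaken (n : Nat) (memo memo' : PySem.Dict Nat Int) :
    ∀ (l : List (Nat × Bool)) (seen seen' : List Nat),
    (∀ d, (memo.get? d).isSome → (memo'.get? d).isSome) →
    (∀ x ∈ seen, (memo'.get? x).isSome ∨ n ≤ x ∨ x ∈ seen') →
    Ready n memo seen l → Ready n memo' seen' l := by
  intro l
  induction l with
  | nil => intro _ _ _ _ _; trivial
  | cons e rest ih =>
      obtain ⟨i, b⟩ := e
      intro seen seen' hmm hs hR
      obtain ⟨hhead, hrest⟩ := hR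
      refine ⟨?_, ih (i :: seen) (i :: seen') hmm ?_ hrest⟩
      · intro hb
        obtain ⟨hi, hdeps⟩ := hhead hb
        refine ⟨hi, fun d hd hdn => ?_⟩
        rcases hdeps d hd hdn with h1 | h1
        · exact Or.inl (hmm d h1)
        · rcases hs d h1 with h2 | h2 | h2
          · exact Or.inl h2
          · omega
          · exact Or.inr h2
      · intro x hx
        rcases List.mem_cons.mp hx with rfl | hx
        · exact Or.inr (Or.inr (List.mem_cons_self))
        · rcases hs x hx with h2 | h2 | h2
          · exact Or.inl h2
          · exact Or.inr (Or.inl h2)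
          · exact Or.inr (Or.inr (List.mem_cons_of_mem _ h2))

theorem ready_prefix (n : Nat) (memo : PySem.Dict Nat Int) :
    ∀ (ds : List Nat) (seen : List Nat) (tail : List (Nat × Bool)),
    Ready n memo (ds.reverse ++ seen) tail →
    Ready n memo seen (ds.map (fun d => (d, false)) ++ tail) := by
  intro ds
  induction ds with
  | nil => intro seen tail h; simpa using h
  | cons d ds' ih =>
      intro seen tail h
      have h' : Ready n memo (ds'.reverse ++ (d :: seen)) tail := by
        have e : (d :: ds').reverse ++ seen = ds'.reverse ++ (d :: seen) := by simp
        rw [e] at h; exact h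
      refine (by simp only [Ready]; exact fun a b => ⟨a, b⟩ : (false = true → _) → _ → Ready n memo seen ((d, false) :: (List.map (fun d => (d, false)) ds' ++ tail))) (fun hb => nomatch hb) (ih (d :: seen) tail h')

theorem bestVal_eq (A : List Int) (memo : PySem.Dict Nat Int) (i : Nat) (hi : i < A.length)
    (hS : Sound A memo)
    (hd : ∀ d ∈ depsL i, d < A.length → (memo.get? d).isSome) :
    bestVal A A.length memo i = gspec A i := by
  have key : ∀ d ∈ depsL i, memo.getD d 0 = gspec A d := by
    intro d hdl
    cases hq : memo.get? d with
    | some v =>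
        rw [PySem.Dict.getD_eq_get?_getD, hq, Option.getD_some]
        exact (hS d v hq).2
    | none =>
        by_cases hdn : d < A.length
        · have := hd d hdl hdn; rw [hq] at this; simp at this
        · rw [PySem.Dict.getD_eq_get?_getD, hq, Option.getD_none,
            gspec_of_ge A d (by omega)]
  have k2 := key (i+2) (by simp [depsL])
  have k3 := key (i+3) (by simp [depsL])
  have k4 := key (i+4) (by simp [depsL])
  have k5 := key (i+5) (by simp [depsL])
  have k6 := key (i+6) (by simp [depsL])
  simp only [bestVal, k2, k3, k4, k5, k6]
  conv_rhs => rw [gspec]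
  rw [dif_neg (by omega : ¬ A.length ≤ i)]
  have c1 : ((i:Int)+1 < ((A.length : Nat) : Int)) ↔ (i+1 < A.length) := by omega
  have c2 : ((i:Int)+2 < ((A.length : Nat) : Int)) ↔ (i+2 < A.length) := by omega
  simp only [c1, c2]

theorem entryCost_pos (n : Nat) (e : Nat × Bool) : 0 < entryCost n e := by
  obtain ⟨i, b⟩ := e
  cases b <;> simp only [entryCost] <;> first | exact Nat.one_pos | (split <;> positivity)

theorem runB_dec (n : Nat) (i : Nat) (rest : List (Nat × Bool)) (memo : PySem.Dict Nat Int)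
    (h : i < n) :
    stackCost n ((([i+2,i+3,i+4,i+5,i+6].filter
        (fun d => decide (d < n) && (memo.get? d).isNone)).reverse.map (fun d => (d, false)))
        ++ (i, true) :: rest)
      < stackCost n ((i, false) :: rest) := by
  set ms := [i+2,i+3,i+4,i+5,i+6].filter (fun d => decide (d < n) && (memo.get? d).isNone) with hms
  have hmem : ∀ d ∈ ms, i + 2 ≤ d ∧ d < n := by
    intro d hd
    rw [hms, List.mem_filter] at hd
    obtain ⟨hd1, hd2⟩ := hd
    simp only [Bool.and_eq_true, decide_eq_true_eq] at hd2
    simp only [List.mem_cons, List.not_mem_nil, or_false] at hd1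
    omega
  have hbound : ∀ x ∈ (ms.reverse.map (fun d => (d, false))).map (entryCost n),
      x ≤ 6^(n-i-2) := by
    intro x hx
    rw [List.map_map] at hx
    simp only [List.mem_map, List.mem_reverse, Function.comp] at hx
    obtain ⟨d, hd, rfl⟩ := hx
    obtain ⟨h1, h2⟩ := hmem d hd
    simp only [entryCost, if_pos h2]
    exact Nat.pow_le_pow_right (by norm_num) (by omega)
  have hlen : ms.length ≤ 5 := by
    have := List.length_filter_le (fun d => decide (d < n) && (memo.get? d).isNone)
      [i+2,i+3,i+4,i+5,i+6]
    simpa [hms] using this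
  have hsum : ((ms.reverse.map (fun d => (d, false))).map (entryCost n)).sum ≤ 5 * 6^(n-i-2) := by
    calc ((ms.reverse.map (fun d => (d, false))).map (entryCost n)).sum
        ≤ ((ms.reverse.map (fun d => (d, false))).map (entryCost n)).length • (6^(n-i-2)) :=
          List.sum_le_card_nsmul _ _ hbound
      _ ≤ 5 * 6^(n-i-2) := by
          simp only [smul_eq_mul, List.length_map, List.length_reverse]
          exact Nat.mul_le_mul_right _ hlen
  simp only [stackCost, List.map_append, List.sum_append, List.map_cons, List.sum_cons,
    entryCost, if_pos h]
  by_cases hk : i + 3 ≤ n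
  · have hpow : 6^(n-i) = 36 * 6^(n-i-2) := by
      have : n - i = (n - i - 2) + 2 := by omega
      rw [this, pow_add]; norm_num [Nat.mul_comm]
    have hp : 1 ≤ 6^(n-i-2) := Nat.one_le_pow _ _ (by norm_num)
    omega
  · have hnil : ms = [] := by
      rw [hms, List.filter_eq_nil_iff]
      intro d hd
      simp only [List.mem_cons, List.not_mem_nil, or_false] at hd
      simp only [Bool.and_eq_true, decide_eq_true_eq, not_and]
      intro hdn; omega
    rw [hnil]
    have hp : 6 ≤ 6^(n-i) := by
      calc (6:Nat) = 6^1 := (pow_one 6).symm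
      _ ≤ 6^(n-i) := Nat.pow_le_pow_right (by norm_num) (by omega)
    simp only [List.reverse_nil, List.map_nil, List.sum_nil]
    omega

theorem runB_inv (A : List Int) (fuel : Nat) :
    ∀ (s : List (Nat × Bool)) (memo : PySem.Dict Nat Int),
    stackCost A.length s < fuel →
    Sound A memo → Ready A.length memo [] s → Has0 A.length memo s →
    Sound A (runB A A.length fuel s memo) ∧ Has0 A.length (runB A A.length fuel s memo) [] := by
  induction fuel with
  | zero => intro s memo hf; omega
  | succ fuel ih =>
      intro s memo hf hS hR hZ
      match s with
      | [] =>
          simp only [runB]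
          refine ⟨hS, ?_⟩
          rcases hZ with h | h | ⟨b, hb⟩
          · exact Or.inl h
          · exact Or.inr (Or.inl h)
          · exact (List.not_mem_nil hb).elim
      | (i, true) :: rest =>
          simp only [runB]
          obtain ⟨hhead, hrest⟩ := hR
          obtain ⟨hi, hdeps⟩ := hhead rfl
          have hdeps' : ∀ d ∈ depsL i, d < A.length → (memo.get? d).isSome := by
            intro d hd hdn
            rcases hdeps d hd hdn with h | h
            · exact h
            · exact (List.not_mem_nil h).elim
          have hb := bestVal_eq A memo i hi hS hdeps'
          have hmm : ∀ d, (memo.get? d).isSome →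
              ((memo.insert i (bestVal A A.length memo i)).get? d).isSome := by
            intro d hd
            rw [PySem.Dict.get?_insert]
            split <;> simp_all
          have hf' : stackCost A.length rest < fuel := by
            have he : stackCost A.length ((i, true) :: rest) = 1 + stackCost A.length rest := by
              simp [stackCost, entryCost]
            omega
          apply ih rest _ hf'
          · intro k v hk
            rw [PySem.Dict.get?_insert] at hk
            split at hk
            · rename_i hki
              subst hki
              refine ⟨hi, ?_⟩
              rw [Option.some_inj] at hk
              rw [← hk, hb]
            · exact hS k v hk
          · apply ready_weaken _ memo _ rest [i] [] hmm _ hrest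
            intro x hx
            rcases List.mem_cons.mp hx with rfl | hx
            · exact Or.inl (by rw [PySem.Dict.get?_insert_self]; rfl)
            · exact (List.not_mem_nil hx).elim
          · rcases hZ with h | h | ⟨b, hb0⟩
            · exact Or.inl h
            · exact Or.inr (Or.inl (hmm 0 h))
            · rcases List.mem_cons.mp hb0 with he | hb0
              · obtain ⟨h0, -⟩ := Prod.mk.injEq .. ▸ he
                exact Or.inr (Or.inl (by rw [← h0, PySem.Dict.get?_insert_self]; rfl))
              · exact Or.inr (Or.inr ⟨b, hb0⟩)
      | (i, false) :: rest =>
          obtain ⟨-, hrest⟩ := hR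
          by_cases h : i < A.length ∧ (memo.get? i).isNone
          · simp only [runB, if_pos h]
            have hf' : stackCost A.length
                (([i+2,i+3,i+4,i+5,i+6].filter
                  (fun d => decide (d < A.length) && (memo.get? d).isNone)).reverse.map
                    (fun d => (d, false)) ++ (i, true) :: rest) < fuel := by
              have := runB_dec A.length i rest memo h.1
              omega
            apply ih _ _ hf' hS
            · have hmid : Ready A.length memo
                  ([i+2,i+3,i+4,i+5,i+6].filter
                    (fun d => decide (d < A.length) && (memo.get? d).isNone))
                  ((i, true) :: rest) := by
                simp only [Ready]
                refine ⟨fun _ => ⟨h.1, fun d hd hdn => ?_⟩, ?_⟩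
                · by_cases hq : (memo.get? d).isSome = true
                  · exact Or.inl hq
                  · refine Or.inr (List.mem_filter.mpr ⟨by simpa [depsL] using hd, ?_⟩)
                    simp only [Bool.and_eq_true, decide_eq_true_eq, Option.isNone_iff_eq_none]
                    exact ⟨hdn, Option.not_isSome_iff_eq_none.mp (by simpa using hq)⟩
                · apply ready_weaken _ memo _ rest [i]
                    (i :: [i+2,i+3,i+4,i+5,i+6].filter
                      (fun d => decide (d < A.length) && (memo.get? d).isNone))
                    (fun d hd => hd) _ hrest
                  intro x hx
                  rcases List.mem_cons.mp hx with rfl | hx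
                  · exact Or.inr (Or.inr List.mem_cons_self)
                  · exact (List.not_mem_nil hx).elim
              have := ready_prefix A.length memo
                ([i+2,i+3,i+4,i+5,i+6].filter
                  (fun d => decide (d < A.length) && (memo.get? d).isNone)).reverse
                [] ((i, true) :: rest) (by simpa using hmid)
              simpa using this
            · rcases hZ with h0 | h0 | ⟨b, hb0⟩
              · exact Or.inl h0
              · exact Or.inr (Or.inl h0)
              · rcases List.mem_cons.mp hb0 with he | hb0
                · obtain ⟨h0, -⟩ := Prod.mk.injEq .. ▸ he
                  exact Or.inr (Or.inr ⟨true, List.mem_append.mpr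
                    (Or.inr (by rw [← h0]; exact List.mem_cons_self))⟩)
                · exact Or.inr (Or.inr ⟨b, List.mem_append.mpr
                    (Or.inr (List.mem_cons_of_mem _ hb0))⟩)
          · simp only [runB, if_neg h]
            have hf' : stackCost A.length rest < fuel := by
              have hpos := entryCost_pos A.length (i, false)
              have he : stackCost A.length ((i, false) :: rest)
                  = entryCost A.length (i, false) + stackCost A.length rest := by
                simp [stackCost]
              omega
            rw [Decidable.not_and_iff_not_or_not] at h
            apply ih _ _ hf' hS
            · apply ready_weaken _ memo _ rest [i] [] (fun d hd => hd) _ hrest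
              intro x hx
              rcases List.mem_cons.mp hx with rfl | hx
              · rcases h with h | h
                · exact Or.inr (Or.inl (by omega))
                · exact Or.inl (by simpa [Option.isNone_iff_eq_none, Option.isSome_iff_ne_none] using h)
              · exact (List.not_mem_nil hx).elim
            · rcases hZ with h0 | h0 | ⟨b, hb0⟩
              · exact Or.inl h0
              · exact Or.inr (Or.inl h0)
              · rcases List.mem_cons.mp hb0 with he | hb0
                · obtain ⟨h0, -⟩ := Prod.mk.injEq .. ▸ he
                  subst h0
                  rcases h with h | h
                  · exact Or.inl (by omega)
                  · exact Or.inr (Or.inl (by simpa [Option.isSome_iff_ne_none, Option.isNone_iff_eq_none] using h))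
                · exact Or.inr (Or.inr ⟨b, hb0⟩)

theorem f_alt_eq_gspec (A : List Int) : f_alt A = gspec A 0 := by
  have h0 : Sound A PySem.Dict.empty := by
    intro k v h
    rw [PySem.Dict.get?_empty] at h
    cases h
  have hR : Ready A.length PySem.Dict.empty [] [(0, false)] := by
    simp only [Ready]
    refine ⟨?_, ?_⟩
    · intro hb; exact absurd hb (by simp)
    · trivial
  have hZ : Has0 A.length PySem.Dict.empty [(0, false)] :=
    Or.inr (Or.inr ⟨false, List.mem_cons_self⟩)
  obtain ⟨hS, hZ'⟩ := runB_inv A (stackCost A.length [(0, false)] + 1) [(0, false)]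
    PySem.Dict.empty (by omega) h0 hR hZ
  show (runB A A.length (stackCost A.length [(0, false)] + 1) [(0, false)]
      PySem.Dict.empty).getD 0 0 = gspec A 0
  cases hq : (runB A A.length (stackCost A.length [(0, false)] + 1) [(0, false)]
      PySem.Dict.empty).get? 0 with
  | some v =>
      rw [PySem.Dict.getD_eq_get?_getD, hq, Option.getD_some]
      exact (hS 0 v hq).2
  | none =>
      have hn0 : A.length = 0 := by
        rcases hZ' with h | h | ⟨b, hb⟩
        · exact h
        · rw [hq] at h; simp at h
        · exact (List.not_mem_nil hb).elim
      rw [PySem.Dict.getD_eq_get?_getD, hq, Option.getD_none, gspec_of_ge A 0 (by omega)]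

theorem pyAt_natCast (xs : List Int) (j : Nat) : pyAt xs (j : Int) = xs.getD j 0 := by
  simp [pyAt, List.getD_eq_getElem?_getD]

-- invariant for A's dp list
def DpInv (A : List Int) (dp : List Int) (k : Nat) : Prop :=
  dp.length = A.length + 5 ∧ ∀ j : Nat, k ≤ j → dp.getD j 0 = gspec A j

theorem fStep_inv (A : List Int) (dp : List Int) (i : Nat) (h : i < A.length)
    (hInv : DpInv A dp (i+1)) : DpInv A (fStep A (A.length : Int) dp (i : Int)) i := by
  obtain ⟨hlen, hval⟩ := hInv
  have hstep : fStep A (A.length : Int) dp (i : Int) = dp.set i (gspec A i) := by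
    have e2 : pyAt dp ((i:Int)+2) = gspec A (i+2) := by
      rw [show ((i:Int)+2) = ((i+2:Nat):Int) from by push_cast; ring, pyAt_natCast]
      exact hval _ (by omega)
    have e3 : pyAt dp ((i:Int)+3) = gspec A (i+3) := by
      rw [show ((i:Int)+3) = ((i+3:Nat):Int) from by push_cast; ring, pyAt_natCast]
      exact hval _ (by omega)
    have e4 : pyAt dp ((i:Int)+4) = gspec A (i+4) := by
      rw [show ((i:Int)+4) = ((i+4:Nat):Int) from by push_cast; ring, pyAt_natCast]
      exact hval _ (by omega)
    have e5 : pyAt dp ((i:Int)+5) = gspec A (i+5) := by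
      rw [show ((i:Int)+5) = ((i+5:Nat):Int) from by push_cast; ring, pyAt_natCast]
      exact hval _ (by omega)
    have e6 : pyAt dp ((i:Int)+6) = gspec A (i+6) := by
      rw [show ((i:Int)+6) = ((i+6:Nat):Int) from by push_cast; ring, pyAt_natCast]
      exact hval _ (by omega)
    simp only [fStep, e2, e3, e4, e5, e6, Int.toNat_natCast]
    congr 1
    conv_rhs => rw [gspec]
    rw [dif_neg (by omega : ¬ A.length ≤ i)]
  rw [hstep]
  refine ⟨by simpa using hlen, ?_⟩
  intro j hj
  rcases eq_or_ne j i with rfl | hne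
  · rw [List.getD_eq_getElem?_getD, List.getElem?_set_self (by omega), Option.getD_some]
  · rw [List.getD_eq_getElem?_getD, List.getElem?_set_ne (by omega), ← List.getD_eq_getElem?_getD]
    exact hval _ (by omega)

theorem foldA (A : List Int) (k : Nat) (hk : k ≤ A.length) :
    ∀ dp, DpInv A dp k →
      DpInv A ((PySem.List.pyRange ((k : Int) - 1) (-1) (-1)).foldl (fStep A (A.length : Int)) dp) 0 := by
  induction k with
  | zero =>
      intro dp hInv
      rw [PySem.List.pyRange_neg_one_eq_nil (by norm_num)]
      exact ⟨hInv.1, fun j _ => hInv.2 j (by omega)⟩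
  | succ m ih =>
      intro dp hInv
      have hm : m < A.length := by omega
      rw [show ((m+1 : Nat) : Int) - 1 = (m : Int) from by push_cast; ring,
        PySem.List.pyRange_neg_one_cons (by omega : (-1 : Int) < (m : Int))]
      simp only [List.foldl_cons]
      exact ih (by omega) _ (fStep_inv A dp m hm hInv)

theorem f_eq_gspec (A : List Int) (h : A ≠ []) : f A = gspec A 0 := by
  have hn : 1 ≤ A.length := List.length_pos_iff.mpr h
  have hrep : (PySem.List.pyRange 0 ((A.length : Int)+5) 1).map (fun _ => (0:Int))
      = List.replicate (A.length+5) 0 := by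
    rw [PySem.List.pyRange_one, List.map_map]
    simp only [Function.comp_def]
    rw [List.map_const']
    congr 1
    simp
    omega
  have hidx : ((A.length : Int)-1).toNat = A.length - 1 := by omega
  have hInv1 : DpInv A ((List.replicate (A.length+5) 0).set (A.length-1) (pyAt A ((A.length : Int)-1)))
      (A.length-1) := by
    refine ⟨by simp, ?_⟩
    intro j hj
    rcases eq_or_ne j (A.length-1) with rfl | hne
    · rw [List.getD_eq_getElem?_getD, List.getElem?_set_self (by simp; omega), Option.getD_some]
      rw [show ((A.length : Int)-1) = ((A.length - 1 : Nat) : Int) from by omega, pyAt_natCast]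
      conv_rhs => rw [gspec]
      rw [dif_neg (by omega : ¬ A.length ≤ A.length - 1)]
      have hg1 : gspec A (A.length-1+2) = 0 := gspec_of_ge A _ (by omega)
      have hg2 : gspec A (A.length-1+3) = 0 := gspec_of_ge A _ (by omega)
      have hg3 : gspec A (A.length-1+4) = 0 := gspec_of_ge A _ (by omega)
      have hc1 : ¬ (((A.length-1 : Nat) : Int) + 1 < (A.length : Int)) := by omega
      have hc2 : ¬ (((A.length-1 : Nat) : Int) + 2 < (A.length : Int)) := by omega
      simp only [hg1, hg2, hg3, if_neg hc1, if_neg hc2]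
      rw [pyAt_natCast]
      simp
    · rw [List.getD_eq_getElem?_getD, List.getElem?_set_ne (by omega), ← List.getD_eq_getElem?_getD]
      rcases Nat.lt_or_ge j (A.length+5) with hj5 | hj5
      · rw [List.getD_eq_getElem, List.getElem_replicate, gspec_of_ge A j (by omega)]
        simpa using hj5
      · rw [List.getD_eq_default _ _ (by simpa using hj5), gspec_of_ge A j (by omega)]
  have hmain := foldA A (A.length-1) (by omega) _ hInv1
  show pyAt ((PySem.List.pyRange ((A.length : Int)-2) (-1) (-1)).foldl (fStep A (A.length : Int))
      (((PySem.List.pyRange 0 ((A.length : Int)+5) 1).map (fun _ => (0:Int))).set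
        ((A.length : Int)-1).toNat (pyAt A ((A.length : Int)-1)))) 0 = gspec A 0
  rw [hrep, hidx]
  rw [show ((A.length : Int))-2 = ((A.length-1 : Nat) : Int) - 1 from by omega]
  rw [show (0 : Int) = ((0 : Nat) : Int) from rfl, pyAt_natCast]
  exact hmain.2 0 (by omega)

-- ===== VERDICT (by name: the statement is the Claim_ definition above) =====
theorem f_spec : Claim_equal_f := by
  intro A _ hPre
  unfold Spec_f
  rw [f_eq_gspec A hPre, f_alt_eq_gspec]
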